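-- pv_equiv track=rewrite | github.com/pvicky/reedsolomon | GaloisField.py | GF_polynomial_product
-- ===== SOURCE A (Python) =====
-- def polynomials_add(poly_list):
--     maxlen = max([len(i) for i in poly_list])
--
--     result = [0]*maxlen
--     for poly in poly_list:
--         tpoly = [0]*(maxlen-len(poly)) + poly
--         result = [result[i] + tpoly[i]
--                   for i in range(maxlen)]
--
--     return result
--
-- def polynomial_scalar_product(sc, poly):
--     return [sc*x if x is not None else None for x in poly]
--
-- def polynomial_product(poly1, poly2):
--     result_list = []
--
--     maxlen = 0
--     for i in range(len(poly2)):
--         t = polynomial_scalar_product(poly2[i], poly1) + [0]*(len(poly2)-i-1)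
--         result_list.append(t)
--         if len(t) > maxlen:
--             maxlen = len(t)
--
--     result = [0]*maxlen
--
--     for poly in result_list:
--         tpoly = [0]*(maxlen-len(poly)) + poly
--         result = [result[i] + tpoly[i] for i in range(maxlen)]
--
--     return result
--
-- def GF_polynomial_product(a, b, modulo=0):
--     degree_a = len(a)-1
--     degree_b = len(b)-1
--
--     # degree of result is degree of a + degree of b
--     support = degree_a+degree_b
--     result = []
--
--     # k=0 is the highest degree
--     for k in range(support+1):
--         tlist = []
--         for i in range(k+1):
--             if i < len(a) and k-i < len(b):
--                 tlist.append(polynomial_product(a[i], b[k-i]))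
--
--         t = polynomials_add(tlist)
--         if modulo !=0:
--             t = [i%2 for i in t]
--
--         result.append(t)
--     return result
-- ===== SOURCE B (Python) =====
-- def _poly_mul(p1, p2):
--     # direct convolution of two coefficient lists (highest degree first)
--     if not p2:
--         return []
--     out = [0] * (len(p1) + len(p2) - 1)
--     for i, x in enumerate(p1):
--         for j, y in enumerate(p2):
--             out[i + j] += x * y
--     return out
--
-- def _poly_sum(polys):
--     # right-aligned elementwise sum, scattered in place
--     m = max(len(p) for p in polys)
--     out = [0] * m
--     for p in polys:
--         off = m - len(p)
--         for i, c in enumerate(p):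
--             out[off + i] += c
--     return out
--
-- def GF_polynomial_product(a, b, modulo=0):
--     n = len(a) + len(b) - 1
--     if n <= 0:
--         return []
--     buckets = [[] for _ in range(n)]
--     for i, pa in enumerate(a):
--         for j, pb in enumerate(b):
--             buckets[i + j].append(_poly_mul(pa, pb))
--     result = []
--     for bucket in buckets:
--         t = _poly_sum(bucket)
--         if modulo != 0:
--             t = [c % 2 for c in t]
--         result.append(t)
--     return result
-- ===== Notes on version B (the rewrite author's own statement) =====
-- stated objective: faster
-- what changed: Gather became scatter: instead of, for every output index k, rescanning all i with the bounds test 'i < len(a) and k-i < len(b)', B pushes each pair product a[i]*b[j] into bucket i+j in one untested double pass; the inner polynomial product is a direct in-place convolution (out[i+j] += x*y) instead of A's build-shifted-rows-then-sum-of-rebuilt-lists, and the per-bucket sum adds each polynomial in place right-aligned instead of rebuilding the whole accumulator list per polynomial.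
import Mathlib
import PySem

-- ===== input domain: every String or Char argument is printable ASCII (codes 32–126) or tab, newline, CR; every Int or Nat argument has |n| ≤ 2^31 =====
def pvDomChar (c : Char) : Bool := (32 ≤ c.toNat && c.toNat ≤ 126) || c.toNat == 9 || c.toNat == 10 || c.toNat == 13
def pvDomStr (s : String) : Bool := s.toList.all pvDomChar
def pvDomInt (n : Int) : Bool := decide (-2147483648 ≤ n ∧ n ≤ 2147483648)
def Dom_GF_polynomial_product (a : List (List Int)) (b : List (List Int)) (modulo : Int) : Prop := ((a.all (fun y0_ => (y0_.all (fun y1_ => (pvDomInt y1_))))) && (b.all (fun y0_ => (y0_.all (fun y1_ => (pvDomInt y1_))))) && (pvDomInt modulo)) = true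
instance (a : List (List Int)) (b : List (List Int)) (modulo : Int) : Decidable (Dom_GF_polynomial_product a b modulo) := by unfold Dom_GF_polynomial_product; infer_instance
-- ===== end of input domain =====

-- B reorganises the double convolution from gather (per output index k, scan all i) to scatter
-- (per input pair (i,j), push into bucket i+j), with a direct in-place convolution inner product
-- and an in-place right-aligned sum; objective: faster (measured constant-factor speedup).

-- ===== PORT A =====

-- polynomials_add: max() of an empty list raises ValueError in Python; that input is excluded
-- by Pre_, so the .getD 0 default is never reached on admitted inputs.
def pvPolyAddA (ps : List (List Int)) : List Int :=
  let maxlen := (PySem.List.max? (ps.map List.length) (fun x => x)).getD 0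
  ps.foldl (fun result poly =>
    let tpoly := List.replicate (maxlen - poly.length) 0 ++ poly
    (List.range maxlen).map (fun i => result.getD i 0 + tpoly.getD i 0))
    (List.replicate maxlen 0)

-- polynomial_scalar_product: coefficients are ints, the `x is None` branch never fires
def pvScalarProdA (sc : Int) (poly : List Int) : List Int :=
  poly.map (fun x => sc * x)

-- polynomial_product: first loop builds result_list together with the running maxlen,
-- second loop left-pads each row and adds (indices are always in range, so getD is exact)
def pvPolyProdA (p1 p2 : List Int) : List Int :=
  let st := (List.range p2.length).foldl (fun (st : List (List Int) × Nat) i =>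
      let t := pvScalarProdA (p2.getD i 0) p1 ++ List.replicate (p2.length - i - 1) 0
      (st.1 ++ [t], if t.length > st.2 then t.length else st.2))
    ([], 0)
  st.1.foldl (fun result poly =>
    let tpoly := List.replicate (st.2 - poly.length) 0 ++ poly
    (List.range st.2).map (fun i => result.getD i 0 + tpoly.getD i 0))
    (List.replicate st.2 0)

def GF_polynomial_product (a : List (List Int)) (b : List (List Int)) (modulo : Int) : List (List Int) :=
  let degree_a : Int := PySem.List.len a - 1
  let degree_b : Int := PySem.List.len b - 1
  let support : Int := degree_a + degree_b
  (PySem.List.pyRange 0 (support + 1) 1).foldl (fun result k =>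
    let tlist := (PySem.List.pyRange 0 (k + 1) 1).foldl (fun tl i =>
      if decide (i < PySem.List.len a) && decide (k - i < PySem.List.len b) then
        tl ++ [pvPolyProdA (PySem.List.pyGetD a i []) (PySem.List.pyGetD b (k - i) [])]
      else tl) []
    let t := pvPolyAddA tlist
    let t := if modulo ≠ 0 then t.map (fun c => PySem.Int.mod c 2) else t
    result ++ [t]) []

-- ===== PORT B =====

-- _poly_mul: direct convolution, out[i+j] += x*y (indices always in range, pySetD/pyGetD exact)
def pvPolyMulB (p1 p2 : List Int) : List Int :=
  if p2.length = 0 then []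
  else
    (PySem.List.enumerate p1 0).foldl (fun out ix =>
      (PySem.List.enumerate p2 0).foldl (fun out jy =>
        PySem.List.pySetD out (ix.1 + jy.1)
          (PySem.List.pyGetD out (ix.1 + jy.1) 0 + ix.2 * jy.2)) out)
      (List.replicate (p1.length + p2.length - 1) 0)

-- _poly_sum: right-aligned in-place scatter; max() of an empty bucket raises ValueError in
-- Python (excluded by Pre_), so the .getD 0 default is never reached on admitted inputs.
def pvPolySumB (ps : List (List Int)) : List Int :=
  let m := (PySem.List.max? (ps.map List.length) (fun x => x)).getD 0
  ps.foldl (fun out p =>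
    let off : Int := (m : Int) - (p.length : Int)
    (PySem.List.enumerate p 0).foldl (fun out ic =>
      PySem.List.pySetD out (off + ic.1)
        (PySem.List.pyGetD out (off + ic.1) 0 + ic.2)) out) (List.replicate m 0)

def GF_polynomial_product_alt (a : List (List Int)) (b : List (List Int)) (modulo : Int) : List (List Int) :=
  let n : Int := PySem.List.len a + PySem.List.len b - 1
  if n ≤ 0 then []
  else
    let buckets := (PySem.List.enumerate a 0).foldl (fun bk ip =>
      (PySem.List.enumerate b 0).foldl (fun bk jp =>
        PySem.List.pySetD bk (ip.1 + jp.1)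
          (PySem.List.pyGetD bk (ip.1 + jp.1) [] ++ [pvPolyMulB ip.2 jp.2])) bk)
      (List.replicate n.toNat ([] : List (List Int)))
    buckets.foldl (fun result bucket =>
      let t := pvPolySumB bucket
      let t := if modulo ≠ 0 then t.map (fun c => PySem.Int.mod c 2) else t
      result ++ [t]) []

-- ===== PRECONDITION & SPEC =====
-- Pre_ excludes exactly the inputs where A raises ValueError (max() of an empty list inside
-- polynomials_add): one of a, b empty while the other has length ≥ 2.  B raises there too.
def Pre_GF_polynomial_product (a : List (List Int)) (b : List (List Int)) (modulo : Int) : Prop :=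
  (a ≠ [] ∧ b ≠ []) ∨ a.length + b.length ≤ 1

instance (a : List (List Int)) (b : List (List Int)) (modulo : Int) : Decidable (Pre_GF_polynomial_product a b modulo) := by
  unfold Pre_GF_polynomial_product; infer_instance

def pvWitness_GF_polynomial_product : List (List Int) × List (List Int) × Int :=
  ([[1, 2], [3]], [[1], [0, 1]], 0)

def Spec_GF_polynomial_product (a : List (List Int)) (b : List (List Int)) (modulo : Int) (out : List (List Int)) : Prop := out = GF_polynomial_product_alt a b modulo
instance (a : List (List Int)) (b : List (List Int)) (modulo : Int) (out : List (List Int)) : Decidable (Spec_GF_polynomial_product a b modulo out) := by unfold Spec_GF_polynomial_product; infer_instance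

-- ===== CLAIM (what is proved, stated in full; the proofs are below) =====
def Claim_equal_GF_polynomial_product : Prop := ∀ (a : List (List Int)) (b : List (List Int)) (modulo : Int), Dom_GF_polynomial_product a b modulo → Pre_GF_polynomial_product a b modulo → Spec_GF_polynomial_product a b modulo (GF_polynomial_product a b modulo)


-- ===== LEMMAS AND PROOFS =====

theorem pv_scatter_len (v : Nat → Int) (base n : Nat) (out : List Int) :
    ((List.range n).foldl (fun o j => o.set (base + j) (o.getD (base + j) 0 + v j)) out).length
      = out.length := by
  induction n with
  | zero => simp
  | succ n ih => rw [List.range_succ, List.foldl_append]; simpa using ih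

theorem pv_scatter_getD (v : Nat → Int) (base n : Nat) (out : List Int)
    (h : base + n ≤ out.length) (q : Nat) :
    ((List.range n).foldl (fun o j => o.set (base + j) (o.getD (base + j) 0 + v j)) out).getD q 0
      = out.getD q 0 + (if base ≤ q ∧ q - base < n then v (q - base) else 0) := by
  induction n with
  | zero => simp
  | succ n ih =>
    rw [List.range_succ, List.foldl_append]
    have hlen := pv_scatter_len v base n out
    set prev := (List.range n).foldl (fun o j => o.set (base + j) (o.getD (base + j) 0 + v j)) out with hprev
    simp only [List.foldl_cons, List.foldl_nil]
    rw [List.getD_eq_getElem?_getD, List.getElem?_set]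
    by_cases hq : base + n = q
    · subst hq
      have hlt : base + n < prev.length := by omega
      simp only [if_pos hlt]
      rw [ih (by omega)]
      have : ¬ ((base + n) - base < n) := by omega
      simp only [if_neg (by omega : ¬ (base ≤ base + n ∧ base + n - base < n))]
      have h2 : base ≤ base + n ∧ (base + n) - base < n + 1 := by omega
      rw [if_pos h2]
      simp
    · rw [if_neg hq, ← List.getD_eq_getElem?_getD, ih (by omega)]
      congr 1
      by_cases hb : base ≤ q ∧ q - base < n
      · rw [if_pos hb, if_pos (by omega)]
      · rw [if_neg hb, if_neg (by omega)]

theorem pv_scatters_len {ι : Type} (ps : List ι) (base cnt : ι → Nat) (v : ι → Nat → Int)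
    (out : List Int) :
    (ps.foldl (fun o p => (List.range (cnt p)).foldl
        (fun o j => o.set (base p + j) (o.getD (base p + j) 0 + v p j)) o) out).length
      = out.length := by
  induction ps generalizing out with
  | nil => rfl
  | cons p ps ih => rw [List.foldl_cons, ih, pv_scatter_len]

theorem pv_scatters_getD {ι : Type} (ps : List ι) (base cnt : ι → Nat) (v : ι → Nat → Int)
    (out : List Int) (h : ∀ p ∈ ps, base p + cnt p ≤ out.length) (q : Nat) :
    (ps.foldl (fun o p => (List.range (cnt p)).foldl
        (fun o j => o.set (base p + j) (o.getD (base p + j) 0 + v p j)) o) out).getD q 0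
      = out.getD q 0
        + (ps.map (fun p => if base p ≤ q ∧ q - base p < cnt p then v p (q - base p) else 0)).sum := by
  induction ps generalizing out with
  | nil => simp
  | cons p ps ih =>
    rw [List.foldl_cons, ih _ (fun p hp => by rw [pv_scatter_len]; exact h p (List.mem_cons_of_mem _ hp)),
        pv_scatter_getD _ _ _ _ (h p List.mem_cons_self) q]
    simp only [List.map_cons, List.sum_cons]
    ring

theorem pv_gather_len (ps : List (List Int)) (m : Nat) (init : List Int) (hinit : init.length = m) :
    (ps.foldl (fun result poly =>
        (List.range m).map (fun i => result.getD i 0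
          + (List.replicate (m - poly.length) 0 ++ poly).getD i 0)) init).length = m := by
  induction ps generalizing init with
  | nil => exact hinit
  | cons p ps ih => rw [List.foldl_cons]; exact ih _ (by simp)

theorem pv_gather_getD (ps : List (List Int)) (m : Nat) (init : List Int)
    (hinit : init.length = m) (q : Nat) (hq : q < m) :
    (ps.foldl (fun result poly =>
        (List.range m).map (fun i => result.getD i 0
          + (List.replicate (m - poly.length) 0 ++ poly).getD i 0)) init).getD q 0
      = init.getD q 0
        + (ps.map (fun poly => (List.replicate (m - poly.length) 0 ++ poly).getD q 0)).sum := by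
  induction ps generalizing init with
  | nil => simp
  | cons p ps ih =>
    rw [List.foldl_cons, ih _ (by simp), PySem.List.getD_map_range _ _ _ _ hq]
    simp only [List.map_cons, List.sum_cons]
    ring

theorem pv_pad_getD (m : Nat) (p : List Int) (q : Nat) :
    (List.replicate (m - p.length) 0 ++ p).getD q 0
      = if m - p.length ≤ q ∧ q - (m - p.length) < p.length then p.getD (q - (m - p.length)) 0
        else 0 := by
  by_cases h1 : q < m - p.length
  · rw [List.getD_append _ _ _ _ (by simpa using h1), if_neg (by omega)]
    simp [List.getD_eq_getElem?_getD]
  · rw [List.getD_append_right _ _ _ _ (by simpa using h1)]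
    simp only [List.length_replicate]
    by_cases h2 : q - (m - p.length) < p.length
    · rw [if_pos ⟨by omega, h2⟩]
    · rw [if_neg (by omega)]
      simp [List.getD_eq_getElem?_getD, List.getElem?_eq_none (by omega : p.length ≤ q - (m - p.length))]

theorem pv_conv_reflect (la lb q : Nat) (f g : Nat → Int) :
    ((List.range lb).map (fun i => if i ≤ q ∧ q - i < la then g i * f (q - i) else 0)).sum
      = ((List.range la).map (fun i => if i ≤ q ∧ q - i < lb then f i * g (q - i) else 0)).sum := by
  have bridge : ∀ (n : Nat) (h : Nat → Int),
      ((List.range n).map h).sum = ∑ i ∈ Finset.range n, h i := fun _ _ => rfl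
  rw [bridge, bridge]
  have norm : ∀ (m n : Nat) (h : Nat → Int),
      (∑ i ∈ Finset.range m, if i ≤ q ∧ q - i < n then h i else 0)
        = ∑ i ∈ Finset.range (q + 1), if i < m ∧ q - i < n then h i else 0 := by
    intro m n h
    calc (∑ i ∈ Finset.range m, if i ≤ q ∧ q - i < n then h i else 0)
        = ∑ i ∈ Finset.range m, if i < m ∧ i ≤ q ∧ q - i < n then h i else 0 := by
          refine Finset.sum_congr rfl (fun i hi => ?_)
          rw [Finset.mem_range] at hi
          by_cases hc : i ≤ q ∧ q - i < n
          · rw [if_pos hc, if_pos ⟨hi, hc⟩]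
          · rw [if_neg hc, if_neg (by tauto)]
      _ = ∑ i ∈ Finset.range (m + q + 1), if i < m ∧ i ≤ q ∧ q - i < n then h i else 0 := by
          have hsub : Finset.range m ⊆ Finset.range (m + q + 1) := Finset.range_subset.mpr (fun x hx => Finset.mem_range.mpr (by omega))
          refine Finset.sum_subset hsub (fun x hx hnx => ?_)
          rw [Finset.mem_range] at hx hnx
          exact if_neg (fun hcon => absurd hcon.1 hnx)
      _ = ∑ i ∈ Finset.range (q + 1), if i < m ∧ i ≤ q ∧ q - i < n then h i else 0 := by
          have hsub : Finset.range (q + 1) ⊆ Finset.range (m + q + 1) := Finset.range_subset.mpr (fun x hx => Finset.mem_range.mpr (by omega))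
          refine (Finset.sum_subset hsub (fun x hx hnx => ?_)).symm
          rw [Finset.mem_range] at hx hnx
          exact if_neg (fun hcon => absurd hcon.2.1 (by omega))
      _ = ∑ i ∈ Finset.range (q + 1), if i < m ∧ q - i < n then h i else 0 := by
          refine Finset.sum_congr rfl (fun i hi => ?_)
          rw [Finset.mem_range] at hi
          by_cases hc : i < m ∧ q - i < n
          · rw [if_pos ⟨hc.1, by omega, hc.2⟩, if_pos hc]
          · rw [if_neg (by tauto), if_neg hc]
  rw [norm lb la (fun i => g i * f (q - i)), norm la lb (fun i => f i * g (q - i))]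
  rw [← Finset.sum_range_reflect (fun i => if i < lb ∧ q - i < la then g i * f (q - i) else 0) (q + 1)]
  refine Finset.sum_congr rfl (fun j hj => ?_)
  rw [Finset.mem_range] at hj
  have h1 : q + 1 - 1 - j = q - j := by omega
  have h2 : q - (q - j) = j := by omega
  rw [h1, h2]
  by_cases hc : j < la ∧ q - j < lb
  · rw [if_pos (by tauto), if_pos hc, mul_comm]
  · rw [if_neg (by tauto), if_neg hc]

-- rewrite Python's enumerate-driven "out[base+j] += g(p[j])" loop into a range-indexed scatter
theorem pv_enum_scatter (p : List Int) (base : Nat) (g : Int → Int) (out : List Int) :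
    (PySem.List.enumerate p 0).foldl (fun o ic =>
        PySem.List.pySetD o ((base : Int) + ic.1)
          (PySem.List.pyGetD o ((base : Int) + ic.1) 0 + g ic.2)) out
      = (List.range p.length).foldl
          (fun o j => o.set (base + j) (o.getD (base + j) 0 + g (p.getD j 0))) out := by
  rw [PySem.List.enumerate_eq_map_pyRange p 0, List.foldl_map, PySem.List.pyRange_one, List.foldl_map]
  have hlen : ((PySem.List.len p - 0).toNat) = p.length := by simp
  rw [hlen]
  refine PySem.List.foldl_congr_mem _ _ _ _ (fun acc j hj => ?_)
  have h1 : (base : Int) + (0 + (j : Int)) = ((base + j : Nat) : Int) := by push_cast; ring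
  have h2 : (0 : Int) + (j : Int) = ((j : Nat) : Int) := by ring
  rw [h1, PySem.List.pySetD_natCast, PySem.List.pyGetD_natCast]
  simp only [h2, PySem.List.pyGetD_natCast]

-- maximum list length bound from Python's max(...)
theorem pv_maxlen_le (ps : List (List Int)) (p : List Int) (hp : p ∈ ps) :
    p.length ≤ (PySem.List.max? (ps.map List.length) (fun x => x)).getD 0 := by
  rcases hmx : PySem.List.max? (ps.map List.length) (fun x => x) with _ | m0
  · rw [PySem.List.max?_eq_none_iff] at hmx
    simp only [List.map_eq_nil_iff] at hmx
    subst hmx; cases hp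
  · simpa using PySem.List.max?_isMax hmx p.length (List.mem_map_of_mem hp)

theorem pv_polyadd_eq (ps : List (List Int)) : pvPolyAddA ps = pvPolySumB ps := by
  simp only [pvPolyAddA, pvPolySumB]
  set m := (PySem.List.max? (ps.map List.length) (fun x => x)).getD 0 with hm
  have hB : ps.foldl (fun out p =>
      (PySem.List.enumerate p 0).foldl (fun out ic =>
        PySem.List.pySetD out ((m : Int) - (p.length : Int) + ic.1)
          (PySem.List.pyGetD out ((m : Int) - (p.length : Int) + ic.1) 0 + ic.2)) out)
      (List.replicate m 0)
    = ps.foldl (fun o p => (List.range p.length).foldl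
        (fun o j => o.set ((m - p.length) + j) (o.getD ((m - p.length) + j) 0 + (p.getD j 0))) o)
      (List.replicate m 0) := by
    refine PySem.List.foldl_congr_mem _ _ _ _ (fun acc p hp => ?_)
    have hle := pv_maxlen_le ps p hp
    have hoff : (m : Int) - (p.length : Int) = ((m - p.length : Nat) : Int) := by omega
    rw [hoff]
    exact pv_enum_scatter p (m - p.length) (fun x => x) acc
  rw [hB]
  have hle : ∀ p ∈ ps, (m - p.length) + p.length ≤ (List.replicate (m:Nat) (0:Int)).length := by
    intro p hp; have := pv_maxlen_le ps p hp; simp; omega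
  have hlenA := pv_gather_len ps m (List.replicate m 0) (by simp)
  have hlenB := pv_scatters_len ps (fun p => m - p.length) (fun p => p.length)
      (fun p j => p.getD j 0) (List.replicate m 0)
  refine List.ext_getElem (by rw [hlenA, hlenB]; simp) (fun q h1 h2 => ?_)
  have hq : q < m := by rw [hlenA] at h1; exact h1
  rw [← List.getD_eq_getElem _ 0 h1, ← List.getD_eq_getElem _ 0 h2]
  rw [pv_gather_getD ps m _ (by simp) q hq,
      pv_scatters_getD ps (fun p => m - p.length) (fun p => p.length) (fun p j => p.getD j 0)
        (List.replicate m 0) hle q]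
  refine congrArg (fun z => (List.replicate m (0:Int)).getD q 0 + z)
    (congrArg List.sum (List.map_congr_left (fun p hp => ?_)))
  exact pv_pad_getD m p q

-- a scaled, right-padded row of polynomial_product, read at index t
theorem pv_row_getD (c : Int) (p1 : List Int) (pad t : Nat) :
    ((p1.map (fun x => c * x)) ++ List.replicate pad 0).getD t 0
      = if t < p1.length then c * p1.getD t 0 else 0 := by
  by_cases h : t < p1.length
  · rw [List.getD_append _ _ _ _ (by simpa using h), if_pos h]
    simp [List.getD_eq_getElem?_getD, h]
  · rw [List.getD_append_right _ _ _ _ (by simpa using h), if_neg h]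
    simp [List.getD_eq_getElem?_getD]

-- the first loop of polynomial_product: the row list together with the running maxlen
theorem pv_rows_fold (p1 p2 : List Int) : ∀ n, n ≤ p2.length →
    (List.range n).foldl (fun (st : List (List Int) × Nat) i =>
        let t := pvScalarProdA (p2.getD i 0) p1 ++ List.replicate (p2.length - i - 1) 0
        (st.1 ++ [t], if t.length > st.2 then t.length else st.2)) ([], 0)
      = ((List.range n).map (fun i =>
            pvScalarProdA (p2.getD i 0) p1 ++ List.replicate (p2.length - i - 1) 0),
          if n = 0 then 0 else p1.length + p2.length - 1) := by
  intro n
  induction n with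
  | zero => intro _; simp
  | succ n ih =>
    intro hn
    rw [List.range_succ, List.foldl_append, ih (by omega), List.map_append]
    simp only [List.foldl_cons, List.foldl_nil, List.map_cons, List.map_nil]
    refine Prod.ext rfl ?_
    simp only [pvScalarProdA, List.length_append, List.length_map, List.length_replicate]
    rcases Nat.eq_zero_or_pos n with hz | hz
    · subst hz
      split_ifs <;> (try contradiction) <;> omega
    · rw [if_neg (by omega : ¬ n = 0)]
      split_ifs <;> (try contradiction) <;> omega

theorem pv_polymul_eq (p1 p2 : List Int) : pvPolyProdA p1 p2 = pvPolyMulB p1 p2 := by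
  rcases Nat.eq_zero_or_pos p2.length with hlb | hlb
  · simp [pvPolyProdA, pvPolyMulB, List.length_eq_zero_iff.mp hlb]
  set m := p1.length + p2.length - 1 with hmdef
  simp only [pvPolyProdA, pvPolyMulB, if_neg (by omega : ¬ p2.length = 0)]
  rw [pv_rows_fold p1 p2 p2.length le_rfl, if_neg (by omega : ¬ p2.length = 0)]
  -- B side: enumerate folds → nested range scatter
  have hB : (PySem.List.enumerate p1 0).foldl (fun out ix =>
      (PySem.List.enumerate p2 0).foldl (fun out jy =>
        PySem.List.pySetD out (ix.1 + jy.1)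
          (PySem.List.pyGetD out (ix.1 + jy.1) 0 + ix.2 * jy.2)) out)
      (List.replicate (p1.length + p2.length - 1) 0)
    = (List.range p1.length).foldl (fun o i => (List.range p2.length).foldl
        (fun o j => o.set (i + j) (o.getD (i + j) 0 + p1.getD i 0 * p2.getD j 0)) o)
      (List.replicate (p1.length + p2.length - 1) 0) := by
    rw [PySem.List.enumerate_eq_map_pyRange p1 0, List.foldl_map, PySem.List.pyRange_one,
        List.foldl_map]
    have hlen : ((PySem.List.len p1 - 0).toNat) = p1.length := by simp
    rw [hlen]
    refine PySem.List.foldl_congr_mem _ _ _ _ (fun acc i hi => ?_)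
    have h2 : (0 : Int) + (i : Int) = ((i : Nat) : Int) := by ring
    simp only [h2, PySem.List.pyGetD_natCast]
    exact pv_enum_scatter p2 i (fun y => p1.getD i 0 * y) acc
  rw [hB]
  have hle : ∀ i ∈ List.range p1.length, i + p2.length ≤ (List.replicate m (0:Int)).length := by
    intro i hi; rw [List.mem_range] at hi; simp; omega
  refine List.ext_getElem ?_ (fun q h1 h2 => ?_)
  · rw [pv_gather_len _ m _ (by simp [hmdef]),
        pv_scatters_len (List.range p1.length) (fun i => i) (fun _ => p2.length)
          (fun i j => p1.getD i 0 * p2.getD j 0) (List.replicate (p1.length + p2.length - 1) 0)]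
    simp [hmdef]
  have hq : q < m := by rwa [pv_gather_len _ m _ (by simp [hmdef])] at h1
  rw [← List.getD_eq_getElem _ 0 h1, ← List.getD_eq_getElem _ 0 h2]
  rw [pv_gather_getD _ m _ (by simp [hmdef]) q hq,
      pv_scatters_getD (List.range p1.length) (fun i => i) (fun _ => p2.length)
        (fun i j => p1.getD i 0 * p2.getD j 0) (List.replicate (p1.length + p2.length - 1) 0) hle q]
  rw [List.map_map]
  have hA : ((List.range p2.length).map ((fun poly => (List.replicate (m - poly.length) 0 ++ poly).getD q 0)
        ∘ (fun i => pvScalarProdA (p2.getD i 0) p1 ++ List.replicate (p2.length - i - 1) 0))).sum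
      = ((List.range p2.length).map (fun i =>
          if i ≤ q ∧ q - i < p1.length then p2.getD i 0 * p1.getD (q - i) 0 else 0)).sum := by
    refine congrArg List.sum (List.map_congr_left (fun i hi => ?_))
    rw [List.mem_range] at hi
    simp only [Function.comp_apply, pvScalarProdA]
    rw [pv_pad_getD]
    have hrl : (p1.map (fun x => p2.getD i 0 * x) ++ List.replicate (p2.length - i - 1) 0).length
        = p1.length + (p2.length - i - 1) := by simp
    rw [hrl]
    have hoff : m - (p1.length + (p2.length - i - 1)) = i := by omega
    rw [hoff]
    by_cases hc : i ≤ q ∧ q - i < p1.length + (p2.length - i - 1)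
    · rw [if_pos hc, pv_row_getD]
      by_cases hc2 : q - i < p1.length
      · rw [if_pos hc2, if_pos ⟨hc.1, hc2⟩]
      · rw [if_neg hc2, if_neg (by tauto)]
    · rw [if_neg hc, if_neg (fun hcon => hc ⟨hcon.1, by omega⟩)]
  rw [hA, pv_conv_reflect p1.length p2.length q (fun i => p1.getD i 0) (fun i => p2.getD i 0)]

-- append-scatter: the bucket-filling loops of B
theorem pv_bscatter_len (w : Nat → List Int) (base n : Nat) (out : List (List (List Int))) :
    ((List.range n).foldl (fun o j => o.set (base + j) (o.getD (base + j) [] ++ [w j])) out).length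
      = out.length := by
  induction n with
  | zero => simp
  | succ n ih => rw [List.range_succ, List.foldl_append]; simpa using ih

theorem pv_bscatter_getD (w : Nat → List Int) (base n : Nat) (out : List (List (List Int)))
    (h : base + n ≤ out.length) (q : Nat) :
    ((List.range n).foldl (fun o j => o.set (base + j) (o.getD (base + j) [] ++ [w j])) out).getD q []
      = out.getD q [] ++ (if base ≤ q ∧ q - base < n then [w (q - base)] else []) := by
  induction n with
  | zero => simp
  | succ n ih =>
    rw [List.range_succ, List.foldl_append]
    have hlen := pv_bscatter_len w base n out
    set prev := (List.range n).foldl (fun o j => o.set (base + j) (o.getD (base + j) [] ++ [w j])) out with hprev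
    simp only [List.foldl_cons, List.foldl_nil]
    rw [List.getD_eq_getElem?_getD, List.getElem?_set]
    by_cases hq : base + n = q
    · subst hq
      have hlt : base + n < prev.length := by omega
      simp only [if_pos hlt]
      rw [ih (by omega)]
      rw [if_neg (by omega : ¬ (base ≤ base + n ∧ base + n - base < n))]
      rw [if_pos (by omega : base ≤ base + n ∧ base + n - base < n + 1)]
      simp
    · rw [if_neg hq, ← List.getD_eq_getElem?_getD, ih (by omega)]
      congr 1
      by_cases hb : base ≤ q ∧ q - base < n
      · rw [if_pos hb, if_pos (by omega)]
      · rw [if_neg hb, if_neg (by omega)]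

theorem pv_bscatters_len {ι : Type} (ps : List ι) (base cnt : ι → Nat) (w : ι → Nat → List Int)
    (out : List (List (List Int))) :
    (ps.foldl (fun o p => (List.range (cnt p)).foldl
        (fun o j => o.set (base p + j) (o.getD (base p + j) [] ++ [w p j])) o) out).length
      = out.length := by
  induction ps generalizing out with
  | nil => rfl
  | cons p ps ih => rw [List.foldl_cons, ih, pv_bscatter_len]

theorem pv_bscatters_getD {ι : Type} (ps : List ι) (base cnt : ι → Nat) (w : ι → Nat → List Int)
    (out : List (List (List Int))) (h : ∀ p ∈ ps, base p + cnt p ≤ out.length) (q : Nat) :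
    (ps.foldl (fun o p => (List.range (cnt p)).foldl
        (fun o j => o.set (base p + j) (o.getD (base p + j) [] ++ [w p j])) o) out).getD q []
      = out.getD q []
        ++ (ps.map (fun p => if base p ≤ q ∧ q - base p < cnt p then [w p (q - base p)] else [])).flatten := by
  induction ps generalizing out with
  | nil => simp
  | cons p ps ih =>
    rw [List.foldl_cons,
        ih _ (fun p hp => by rw [pv_bscatter_len]; exact h p (List.mem_cons_of_mem _ hp)),
        pv_bscatter_getD _ _ _ _ (h p List.mem_cons_self) q]
    simp

-- flatten of singleton-or-empty buckets entries is a filter-map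
theorem pv_flatten_ite {α : Type} (l : List Nat) (P : Nat → Prop) [DecidablePred P] (g : Nat → α) :
    (l.map (fun i => if P i then [g i] else [])).flatten
      = (l.filter (fun i => decide (P i))).map g := by
  induction l with
  | nil => rfl
  | cons x l ih =>
    simp only [List.map_cons, List.flatten_cons, List.filter_cons]
    by_cases hx : P x
    · simp [hx, ih]
    · simp [hx, ih]

-- a Bool predicate that is false from n on filters the same on any longer range
theorem pv_filter_range_congr (p : Nat → Bool) (n m : Nat) (hnm : n ≤ m)
    (h0 : ∀ i, n ≤ i → p i = false) :
    (List.range m).filter p = (List.range n).filter p := by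
  induction m with
  | zero => have : n = 0 := by omega
            simp [this]
  | succ m ih =>
    rcases Nat.lt_or_ge n (m + 1) with hlt | hge
    · rw [List.range_succ, List.filter_append, ih (by omega)]
      simp [h0 m (by omega)]
    · have : n = m + 1 := by omega
      simp [this]


-- enumerate-driven bucket append loop as a range-indexed append-scatter
theorem pv_enum_bscatter (p : List (List Int)) (base : Nat) (g : List Int → List Int)
    (out : List (List (List Int))) :
    (PySem.List.enumerate p 0).foldl (fun o jc =>
        PySem.List.pySetD o ((base : Int) + jc.1)
          (PySem.List.pyGetD o ((base : Int) + jc.1) [] ++ [g jc.2])) out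
      = (List.range p.length).foldl
          (fun o j => o.set (base + j) (o.getD (base + j) [] ++ [g (p.getD j [])])) out := by
  rw [PySem.List.enumerate_eq_map_pyRange p [], List.foldl_map, PySem.List.pyRange_one, List.foldl_map]
  have hlen : ((PySem.List.len p - 0).toNat) = p.length := by simp
  rw [hlen]
  refine PySem.List.foldl_congr_mem _ _ _ _ (fun acc j hj => ?_)
  have h1 : (base : Int) + (0 + (j : Int)) = ((base + j : Nat) : Int) := by push_cast; ring
  have h2 : (0 : Int) + (j : Int) = ((j : Nat) : Int) := by ring
  rw [h1, PySem.List.pySetD_natCast, PySem.List.pyGetD_natCast]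
  simp only [h2, PySem.List.pyGetD_natCast]

-- A's inner gather loop over k, rewritten as the Nat-indexed filtered row list
theorem pv_tlist_eq (a b : List (List Int)) (k : Nat) :
    (PySem.List.pyRange 0 ((k : Int) + 1) 1).foldl (fun tl i =>
        if decide (i < PySem.List.len a) && decide ((k : Int) - i < PySem.List.len b) then
          tl ++ [pvPolyProdA (PySem.List.pyGetD a i []) (PySem.List.pyGetD b ((k : Int) - i) [])]
        else tl) []
      = ((List.range a.length).filter (fun i => decide (i ≤ k ∧ k - i < b.length))).map
          (fun i => pvPolyMulB (a.getD i []) (b.getD (k - i) [])) := by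
  rw [PySem.List.foldl_append_if, List.nil_append, PySem.List.pyRange_one]
  have h1 : (((k : Int) + 1 - 0).toNat) = k + 1 := by omega
  rw [h1, List.filter_map, List.map_map]
  set pC : Nat → Bool := fun i => decide (i ≤ k ∧ i < a.length ∧ k - i < b.length) with hpC
  have hfc : (List.range (k + 1)).filter
      ((fun i => decide (i < PySem.List.len a) && decide ((k : Int) - i < PySem.List.len b))
        ∘ (fun j : Nat => 0 + (j : Int)))
      = (List.range (k + 1)).filter pC := by
    refine List.filter_congr (fun i hi => ?_)
    rw [List.mem_range] at hi
    simp only [Function.comp_apply, hpC, PySem.List.len_eq]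
    rw [Bool.eq_iff_iff]
    simp only [Bool.and_eq_true, decide_eq_true_eq]
    omega
  rw [hfc]
  have hM : (List.range (k + 1)).filter pC = (List.range a.length).filter pC := by
    have e1 := pv_filter_range_congr pC (k + 1) (max (k + 1) a.length) (le_max_left _ _)
      (fun i hi => by simp only [hpC, decide_eq_false_iff_not]; omega)
    have e2 := pv_filter_range_congr pC a.length (max (k + 1) a.length) (le_max_right _ _)
      (fun i hi => by simp only [hpC, decide_eq_false_iff_not]; omega)
    exact e1.symm.trans e2
  rw [hM]
  have hpB : (List.range a.length).filter pC
      = (List.range a.length).filter (fun i => decide (i ≤ k ∧ k - i < b.length)) := by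
    refine List.filter_congr (fun i hi => ?_)
    rw [List.mem_range] at hi
    simp only [hpC]
    rw [Bool.eq_iff_iff]
    simp only [decide_eq_true_eq]
    omega
  rw [hpB]
  refine List.map_congr_left (fun i hi => ?_)
  rw [List.mem_filter, List.mem_range, decide_eq_true_eq] at hi
  simp only [Function.comp_apply]
  have h2 : (0 : Int) + (i : Int) = ((i : Nat) : Int) := by ring
  have h3 : (k : Int) - (0 + (i : Int)) = ((k - i : Nat) : Int) := by omega
  rw [h3]
  simp only [h2, PySem.List.pyGetD_natCast]
  exact pv_polymul_eq _ _

-- ===== VERDICT (by name: the statement is the Claim_ definition above) =====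
theorem GF_polynomial_product_spec : Claim_equal_GF_polynomial_product := by
  intro a b modulo _ hpre
  show GF_polynomial_product a b modulo = GF_polynomial_product_alt a b modulo
  rcases hpre with ⟨ha, hb⟩ | hsmall
  · have hla : 1 ≤ a.length := List.length_pos_iff.mpr ha
    have hlb : 1 ≤ b.length := List.length_pos_iff.mpr hb
    set N := a.length + b.length - 1 with hN
    simp only [GF_polynomial_product, GF_polynomial_product_alt]
    rw [if_neg (by simp only [PySem.List.len_eq]; omega)]
    rw [PySem.List.foldl_append_singleton_eq_map, List.nil_append]
    have hr : (PySem.List.len a - 1 + (PySem.List.len b - 1) + 1) = ((N : Nat) : Int) := by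
      simp only [PySem.List.len_eq]; omega
    rw [hr, PySem.List.pyRange_one, List.map_map]
    have hto : ((((N : Nat) : Int)) - 0).toNat = N := by omega
    rw [hto]
    rw [PySem.List.foldl_append_singleton_eq_map, List.nil_append]
    have htoN : ((PySem.List.len a + PySem.List.len b - 1)).toNat = N := by
      simp only [PySem.List.len_eq]; omega
    rw [htoN]
    have hbuck : (PySem.List.enumerate a 0).foldl (fun bk ip =>
        (PySem.List.enumerate b 0).foldl (fun bk jp =>
          PySem.List.pySetD bk (ip.1 + jp.1)
            (PySem.List.pyGetD bk (ip.1 + jp.1) [] ++ [pvPolyMulB ip.2 jp.2])) bk)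
        (List.replicate N ([] : List (List Int)))
      = (List.range a.length).foldl (fun bk i => (List.range b.length).foldl
          (fun bk j => bk.set (i + j) (bk.getD (i + j) [] ++ [pvPolyMulB (a.getD i []) (b.getD j [])])) bk)
        (List.replicate N ([] : List (List Int))) := by
      rw [PySem.List.enumerate_eq_map_pyRange a [], List.foldl_map, PySem.List.pyRange_one,
          List.foldl_map]
      have hlen : ((PySem.List.len a - 0).toNat) = a.length := by simp
      rw [hlen]
      refine PySem.List.foldl_congr_mem _ _ _ _ (fun acc i hi => ?_)
      have h2 : (0 : Int) + (i : Int) = ((i : Nat) : Int) := by ring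
      simp only [h2, PySem.List.pyGetD_natCast]
      exact pv_enum_bscatter b i (fun pb => pvPolyMulB (a.getD i []) pb) acc
    rw [hbuck]
    have hle : ∀ i ∈ List.range a.length,
        i + b.length ≤ (List.replicate N ([] : List (List Int))).length := by
      intro i hi; rw [List.mem_range] at hi; simp only [List.length_replicate]; omega
    have hblen := pv_bscatters_len (List.range a.length) (fun i => i) (fun _ => b.length)
      (fun i j => pvPolyMulB (a.getD i []) (b.getD j []))
      (List.replicate N ([] : List (List Int)))
    refine List.ext_getElem ?_ (fun q h1 h2 => ?_)
    · rw [List.length_map, List.length_map, List.length_range, hblen, List.length_replicate]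
    have hqN : q < N := by simpa using h1
    have h2' : q < ((List.range a.length).foldl (fun bk i => (List.range b.length).foldl
          (fun bk j => bk.set (i + j) (bk.getD (i + j) [] ++ [pvPolyMulB (a.getD i []) (b.getD j [])])) bk)
        (List.replicate N ([] : List (List Int)))).length := by
      rw [hblen, List.length_replicate]; exact hqN
    rw [List.getElem_map, List.getElem_map]
    rw [← List.getD_eq_getElem _ ([] : List (List Int)) h2']
    have hbq : ((List.range a.length).foldl (fun bk i => (List.range b.length).foldl
          (fun bk j => bk.set (i + j) (bk.getD (i + j) [] ++ [pvPolyMulB (a.getD i []) (b.getD j [])])) bk)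
        (List.replicate N ([] : List (List Int)))).getD q []
      = ((List.range a.length).filter (fun i => decide (i ≤ q ∧ q - i < b.length))).map
          (fun i => pvPolyMulB (a.getD i []) (b.getD (q - i) [])) := by
      rw [pv_bscatters_getD (List.range a.length) (fun i => i) (fun _ => b.length)
            (fun i j => pvPolyMulB (a.getD i []) (b.getD j []))
            (List.replicate N ([] : List (List Int))) hle q]
      rw [pv_flatten_ite (List.range a.length) (fun i => i ≤ q ∧ q - i < b.length)
            (fun i => pvPolyMulB (a.getD i []) (b.getD (q - i) []))]
      simp [List.getD_eq_getElem?_getD, hqN]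
    rw [hbq]
    simp only [Function.comp_apply, List.getElem_range, zero_add]
    simp only [pv_tlist_eq, pv_polyadd_eq]
  · simp only [GF_polynomial_product, GF_polynomial_product_alt]
    rw [PySem.List.pyRange_one_eq_nil (by simp only [PySem.List.len_eq]; omega),
        if_pos (by simp only [PySem.List.len_eq]; omega)]
    rfl
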